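-- pv_equiv track=rewrite | github.com/klangner/bluenotepad | src/sloppy/interpreter.py | _contains
-- ===== SOURCE A (Python) =====
-- def _contains(tokens, words):
--     count = 0
--     for word in words:
--         for token in tokens:
--             if word == token:
--                 count += 1
--                 break
--     return count == len(words)
-- ===== SOURCE B (Python) =====
-- def _contains(tokens, words):
--     needed = set(words)
--     for token in tokens:
--         needed.discard(token)
--     return not needed
-- ===== Notes on version B (the rewrite author's own statement) =====
-- stated objective: simpler
-- what changed: Inverts the traversal: builds a requirement set of words and shrinks it in one pass over tokens, instead of scanning tokens once per word and counting matches.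
import Mathlib
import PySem

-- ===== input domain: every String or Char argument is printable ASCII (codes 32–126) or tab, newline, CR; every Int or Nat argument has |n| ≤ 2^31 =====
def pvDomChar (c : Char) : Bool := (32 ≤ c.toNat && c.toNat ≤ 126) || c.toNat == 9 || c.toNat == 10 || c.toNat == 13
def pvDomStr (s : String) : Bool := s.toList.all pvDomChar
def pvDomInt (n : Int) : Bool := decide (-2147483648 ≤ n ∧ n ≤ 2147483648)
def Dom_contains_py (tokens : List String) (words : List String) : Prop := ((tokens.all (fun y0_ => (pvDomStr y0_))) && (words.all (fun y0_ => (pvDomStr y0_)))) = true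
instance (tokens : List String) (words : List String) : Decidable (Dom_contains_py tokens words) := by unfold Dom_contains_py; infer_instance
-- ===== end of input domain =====

-- B inverts the traversal: one pass over tokens shrinking a requirement set of words (simpler, asymptotically faster).
-- ===== PORT A =====
def contains_py (tokens : List String) (words : List String) : Bool :=
  let count : Nat := words.foldl (fun count word =>
    -- inner loop over tokens with break: bump count at the first token equal to word
    if tokens.any (fun token => word == token) then count + 1 else count) 0
  count == words.length

-- ===== PORT B =====
def contains_py_alt (tokens : List String) (words : List String) : Bool :=
  let needed : PySem.Set String := PySem.Set.ofList words
  let needed := tokens.foldl (fun needed token => PySem.Set.discard needed token) needed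
  needed.isEmpty

-- ===== PRECONDITION & SPEC =====
def Spec_contains_py (tokens : List String) (words : List String) (out : Bool) : Prop := out = contains_py_alt tokens words
instance (tokens : List String) (words : List String) (out : Bool) : Decidable (Spec_contains_py tokens words out) := by unfold Spec_contains_py; infer_instance

-- ===== CLAIM (what is proved, stated in full; the proofs are below) =====
def Claim_equal_contains_py : Prop := ∀ (tokens : List String) (words : List String), Dom_contains_py tokens words → Spec_contains_py tokens words (contains_py tokens words)

-- ===== LEMMAS AND PROOFS =====
theorem pv_count (p : String → Bool) (ws : List String) (n : Nat) :
    ws.foldl (fun c w => if p w then c + 1 else c) n = n + ws.countP p := by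
  induction ws generalizing n with
  | nil => simp
  | cons w ws ih =>
    rw [List.foldl_cons, List.countP_cons, ih]
    by_cases h : p w = true <;> simp only [h, if_true, if_false, Bool.false_eq_true] <;> omega

theorem pv_A_all (tokens words : List String) :
    contains_py tokens words = words.all (fun word => tokens.any (fun token => word == token)) := by
  simp only [contains_py, pv_count, Nat.zero_add]
  rw [Bool.eq_iff_iff, beq_iff_eq, List.all_eq_true]
  exact List.countP_eq_length

theorem pv_discard_foldl (tokens : List String) (s : List String) :
    tokens.foldl (fun needed token => PySem.Set.discard needed token) s
      = s.filter (fun x => ! tokens.contains x) := by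
  induction tokens generalizing s with
  | nil => simp
  | cons t ts ih =>
    rw [List.foldl_cons, ih]
    simp only [PySem.Set.discard, List.filter_filter]
    apply List.filter_congr
    intro x _
    by_cases hx : x = t <;> simp [hx]

theorem pv_B_all (tokens words : List String) :
    contains_py_alt tokens words = words.all (fun word => tokens.any (fun token => word == token)) := by
  simp only [contains_py_alt, pv_discard_foldl]
  rw [Bool.eq_iff_iff]
  simp only [List.isEmpty_iff, List.filter_eq_nil_iff, List.all_eq_true, List.any_eq_true,
    Bool.not_eq_true', List.contains_eq_mem, decide_eq_false_iff_not, not_not, beq_iff_eq,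
    PySem.Set.mem_ofList]
  constructor
  · intro h w hw
    exact ⟨w, h w hw, rfl⟩
  · intro h x hx
    rcases h x hx with ⟨t, ht, rfl⟩
    exact ht

-- ===== VERDICT (by name: the statement is the Claim_ definition above) =====
theorem contains_py_spec : Claim_equal_contains_py := by
  intro tokens words _
  unfold Spec_contains_py
  rw [pv_A_all, pv_B_all]
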